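-- pv_equiv track=rewrite | github.com/ValyIstrate/NLP | Lab2/utils.py | get_and_sort_alphabet
-- ===== SOURCE A (Python) =====
-- def get_and_sort_alphabet(word_frequencies):
--     alphabet = []
--     for word in word_frequencies.keys():
--         for letter in word:
--             if letter not in alphabet:
--                 alphabet.append(letter)
--     alphabet.sort()
--     return alphabet
-- ===== SOURCE B (Python) =====
-- def get_and_sort_alphabet(word_frequencies):
--     letters = []
--     for word in word_frequencies.keys():
--         letters.extend(word)
--     letters.sort()
--     result = []
--     for c in letters:
--         if not result or result[-1] != c:
--             result.append(c)
--     return result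
-- ===== Notes on version B (the rewrite author's own statement) =====
-- stated objective: alternative
-- what changed: B flattens all letters into one list, sorts it once, and deduplicates by a single linear pass keeping each element that differs from the previous one (sort-then-adjacent-dedup), instead of A's membership-test dedup into a growing list followed by a sort.
import Mathlib
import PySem

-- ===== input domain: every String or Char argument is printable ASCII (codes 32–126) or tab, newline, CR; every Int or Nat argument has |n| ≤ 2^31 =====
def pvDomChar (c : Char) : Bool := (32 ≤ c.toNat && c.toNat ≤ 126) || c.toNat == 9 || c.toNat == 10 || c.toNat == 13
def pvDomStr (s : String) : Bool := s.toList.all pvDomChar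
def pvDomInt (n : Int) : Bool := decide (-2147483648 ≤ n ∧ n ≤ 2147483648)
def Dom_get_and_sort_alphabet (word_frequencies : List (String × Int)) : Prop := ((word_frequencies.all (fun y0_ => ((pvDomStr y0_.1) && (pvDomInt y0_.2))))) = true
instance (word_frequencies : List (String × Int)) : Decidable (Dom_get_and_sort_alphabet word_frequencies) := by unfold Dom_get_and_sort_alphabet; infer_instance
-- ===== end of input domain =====

-- B replaces A's membership-dedup-then-sort by flatten, sort once, then a single
-- adjacent-dedup pass (alternative decomposition; no speed claim).

-- ===== PORT A =====
-- A: grow `alphabet` with a membership test per letter, then sort it.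
def get_and_sort_alphabet (word_frequencies : List (String × Int)) : List String :=
  let alphabet :=
    word_frequencies.foldl
      (fun acc p =>
        (p.1.toList.map String.singleton).foldl
          (fun a letter => if letter ∈ a then a else a ++ [letter]) acc)
      []
  PySem.List.sorted alphabet (fun x => x) false

-- ===== PORT B =====
-- B: flatten all letters, sort once, keep each element differing from the previous.
def get_and_sort_alphabet_alt (word_frequencies : List (String × Int)) : List String :=
  let letters :=
    PySem.List.sorted
      (word_frequencies.foldl (fun acc p => acc ++ p.1.toList.map String.singleton) [])
      (fun x => x) false
  letters.foldl
    (fun res c => if res = [] ∨ res.getLast? ≠ some c then res ++ [c] else res) []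

-- ===== PRECONDITION & SPEC =====
def Spec_get_and_sort_alphabet (word_frequencies : List (String × Int)) (out : List String) : Prop := out = get_and_sort_alphabet_alt word_frequencies
instance (word_frequencies : List (String × Int)) (out : List String) : Decidable (Spec_get_and_sort_alphabet word_frequencies out) := by unfold Spec_get_and_sort_alphabet; infer_instance

-- ===== CLAIM (what is proved, stated in full; the proofs are below) =====
def Claim_equal_get_and_sort_alphabet : Prop := ∀ (word_frequencies : List (String × Int)), Dom_get_and_sort_alphabet word_frequencies → Spec_get_and_sort_alphabet word_frequencies (get_and_sort_alphabet word_frequencies)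

-- ===== LEMMAS AND PROOFS =====

-- the letters of one entry, as singleton strings
def pvLetters (p : String × Int) : List String := p.1.toList.map String.singleton

-- spec of the adjacent-dedup pass after the first kept element `l`
def pvSdd (l : String) : List String → List String
  | [] => []
  | x :: xs => if x = l then pvSdd l xs else x :: pvSdd x xs

theorem pvFoldl_dd (xs : List String) (r : List String) (l : String) :
    xs.foldl (fun res c => if res = [] ∨ res.getLast? ≠ some c then res ++ [c] else res)
      (r ++ [l]) = r ++ l :: pvSdd l xs := by
  induction xs generalizing r l with
  | nil => simp [pvSdd]
  | cons x xs ih =>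
    by_cases hx : x = l
    · subst hx
      simp [List.foldl_cons, pvSdd, ih]
    · have : ((r ++ [l]) = [] ∨ (r ++ [l]).getLast? ≠ some x) := by
        right; simp [List.getLast?_append]; exact fun h => hx h.symm
      simp only [List.foldl_cons, if_pos this]
      rw [show r ++ [l] ++ [x] = (r ++ [l]) ++ [x] from rfl, ih (r ++ [l]) x]
      simp [pvSdd, hx]

theorem pvSdd_mem (l : String) (xs : List String)
    (h : (l :: xs).Pairwise (· ≤ ·)) (y : String) :
    y ∈ l :: pvSdd l xs ↔ y ∈ l :: xs := by
  induction xs generalizing l with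
  | nil => simp [pvSdd]
  | cons x xs ih =>
    rcases List.pairwise_cons.mp h with ⟨h1, h2⟩
    by_cases hx : x = l
    · subst hx
      have := ih x h2
      simp only [pvSdd, if_true] at this ⊢
      rw [this]
      simp only [List.mem_cons]
      tauto
    · have := ih x h2
      simp only [pvSdd, if_neg hx]
      simp only [List.mem_cons] at this ⊢
      tauto

theorem pvSdd_pairwise (l : String) (xs : List String)
    (h : (l :: xs).Pairwise (· ≤ ·)) :
    (l :: pvSdd l xs).Pairwise (· < ·) := by
  induction xs generalizing l with
  | nil => simp [pvSdd]
  | cons x xs ih =>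
    rcases List.pairwise_cons.mp h with ⟨h1, h2⟩
    by_cases hx : x = l
    · subst hx
      simp only [pvSdd, if_true]
      exact ih x h2
    · have hlx : l < x := lt_of_le_of_ne (h1 x (by simp)) (fun e => hx e.symm)
      have hp := ih x h2
      simp only [pvSdd, if_neg hx]
      refine List.pairwise_cons.mpr ⟨?_, hp⟩
      intro y hy
      rcases List.mem_cons.mp hy with rfl | hy
      · exact hlx
      · exact lt_trans hlx ((List.pairwise_cons.mp hp).1 y hy)

-- A's nested loop over words is the single fold of `PySem.Set.add` over the flattened letters
theorem pvA_fold (wf : List (String × Int)) (s : List String) :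
    wf.foldl (fun acc p => (p.1.toList.map String.singleton).foldl
        (fun a letter => if letter ∈ a then a else a ++ [letter]) acc) s
      = (wf.flatMap (fun p => p.1.toList.map String.singleton)).foldl
        (fun a letter => if letter ∈ a then a else a ++ [letter]) s := by
  induction wf generalizing s with
  | nil => rfl
  | cons p wf ih => simp [List.foldl_append, ih]

theorem pvStep_eq_add (xs : List String) (s : List String) :
    xs.foldl (fun a letter => if letter ∈ a then a else a ++ [letter]) s
      = xs.foldl PySem.Set.add s := by
  induction xs generalizing s with
  | nil => rfl
  | cons x xs ih =>
    simp only [List.foldl_cons, ih]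
    congr 1
    simp [PySem.Set.add, PySem.Set.contains]

theorem pv_main (wf : List (String × Int)) :
    get_and_sort_alphabet wf = get_and_sort_alphabet_alt wf := by
  unfold get_and_sort_alphabet get_and_sort_alphabet_alt
  rw [pvA_fold, pvStep_eq_add, PySem.List.foldl_append_eq_flatMap]
  rw [show ∀ (M : List String), M.foldl PySem.Set.add [] = PySem.Set.ofList M from
    fun M => (PySem.Set.ofList_eq_foldl M).symm]
  simp only [List.nil_append]
  generalize wf.flatMap (fun p => p.1.toList.map String.singleton) = M
  rcases e : PySem.List.sorted M (fun x => x) false with _ | ⟨m, t⟩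
  · have hM : M = [] := (PySem.List.sorted_eq_nil_iff M (fun x => x) false).mp e
    subst hM
    rfl
  · have hdd : (m :: t).foldl
        (fun res c => if res = [] ∨ res.getLast? ≠ some c then res ++ [c] else res) []
        = m :: pvSdd m t := by
      have h := pvFoldl_dd t [] m
      simp only [List.nil_append] at h
      simp [List.foldl_cons, h]
    rw [hdd]
    have hle : (m :: t).Pairwise (· ≤ ·) := by
      have := PySem.List.sorted_pairwise M (fun x => x)
      rwa [e] at this
    apply PySem.List.sorted_eq_of_perm_of_pairwise_lt
    · rw [List.perm_ext_iff_of_nodup ((pvSdd_pairwise m t hle).nodup) (PySem.Set.nodup_ofList M)]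
      intro y
      rw [pvSdd_mem m t hle y, PySem.Set.mem_ofList]
      have : y ∈ m :: t ↔ y ∈ PySem.List.sorted M (fun x => x) false := by rw [e]
      rw [this, PySem.List.mem_sorted]
    · exact pvSdd_pairwise m t hle

-- ===== VERDICT (by name: the statement is the Claim_ definition above) =====
theorem get_and_sort_alphabet_spec : Claim_equal_get_and_sort_alphabet := by
  intro wf _
  exact pv_main wf
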